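-- pv_equiv track=rewrite | github.com/thealper2/codewars-solutions | 7-kyu/percentage_of_amino_acids.py | aa_percentage
-- ===== SOURCE A (Python) =====
-- def aa_percentage(sequence, residues=None):
--     if residues is None:
--         residues = ["A", "I", "L", "M", "F", "W", "Y", "V"]
--
--     total = len(sequence)
--     if total == 0:
--         return 0
--
--     count = sum(1 for aa in sequence if aa in residues)
--     percentage = (count / total) * 100
--     return round(percentage)
-- ===== SOURCE B (Python) =====
-- def aa_percentage(sequence, residues=None):
--     if residues is None:
--         residues = ["A", "I", "L", "M", "F", "W", "Y", "V"]
--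
--     total = len(sequence)
--     if total == 0:
--         return 0
--
--     counts = {}
--     for aa in sequence:
--         counts[aa] = counts.get(aa, 0) + 1
--     count = sum(counts.get(r, 0) for r in set(residues))
--     return round((count / total) * 100)
-- ===== Notes on version B (the rewrite author's own statement) =====
-- stated objective: faster
-- what changed: B tabulates the sequence once into a frequency dict and sums the counts of the distinct residues, replacing A's per-character membership scan of the residue list.
import Mathlib
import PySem

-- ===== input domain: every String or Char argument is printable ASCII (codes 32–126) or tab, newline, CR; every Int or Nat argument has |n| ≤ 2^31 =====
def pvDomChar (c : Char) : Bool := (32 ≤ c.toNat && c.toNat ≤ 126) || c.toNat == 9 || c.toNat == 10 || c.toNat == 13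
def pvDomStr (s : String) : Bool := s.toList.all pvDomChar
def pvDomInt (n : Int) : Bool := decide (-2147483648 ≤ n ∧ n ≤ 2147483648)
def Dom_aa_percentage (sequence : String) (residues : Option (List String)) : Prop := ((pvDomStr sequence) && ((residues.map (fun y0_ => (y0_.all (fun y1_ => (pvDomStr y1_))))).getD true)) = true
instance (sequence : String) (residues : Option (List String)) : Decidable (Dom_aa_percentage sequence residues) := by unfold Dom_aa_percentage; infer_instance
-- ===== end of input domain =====

-- B tabulates the sequence once into a frequency dict and sums the counts of the distinct
-- residues, instead of A's per-character membership scan of the residue list. Both Pythons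
-- end with the identical float expression round((count / total) * 100); each port carries
-- its own IEEE-754-exact integer model of that expression (pvRoundPct for A, bRoundPct for
-- B), proved equal below.

def pvDefaultResidues : List String := ["A", "I", "L", "M", "F", "W", "Y", "V"]

-- ===== PORT A =====
-- A-side exact model of round((count / total) * 100) on binary64 floats.

-- Banker's rounding (round-half-even) of the nonnegative rational n / d, d > 0.
def pvHalfEven (n d : Nat) : Nat :=
  let q := n / d
  let r := n % d
  if 2 * r < d then q else if d < 2 * r then q + 1 else if q % 2 = 0 then q else q + 1

-- bit_length
def pvBL (n : Nat) : Nat := if n = 0 then 0 else Nat.log2 n + 1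

-- the rational (a * 2^k) / b as a numerator/denominator pair (k may be negative)
def pvFrac (a b : Nat) (k : Int) : Nat × Nat :=
  if 0 ≤ k then (a <<< k.toNat, b) else (a, b <<< (-k).toNat)

-- round-to-nearest double (ties to even) of the positive rational a / b, in the normal
-- range: returns (s, k) with value s * 2^(-k), 2^52 ≤ s < 2^53
def pvRN (a b : Nat) : Nat × Int :=
  let k0 : Int := 52 + (pvBL b : Int) - (pvBL a : Int)
  let p := pvFrac a b k0
  let k := if p.1 < 2 ^ 52 * p.2 then k0 + 1 else if 2 ^ 53 * p.2 ≤ p.1 then k0 - 1 else k0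
  let p2 := pvFrac a b k
  let s := pvHalfEven p2.1 p2.2
  if s = 2 ^ 53 then (2 ^ 52, k - 1) else (s, k)

-- the double s * 2^(-k) as an exact numerator/denominator pair
def pvRat (s : Nat) (k : Int) : Nat × Nat :=
  if 0 ≤ k then (s, 1 <<< k.toNat) else (s <<< (-k).toNat, 1)

-- Python's round((count / total) * 100) for ints 0 ≤ count ≤ total, 0 < total:
-- both binary64 roundings (the division, the product) and the final half-even rounding
-- are modelled exactly in integer arithmetic.
def pvRoundPct (count total : Int) : Int :=
  let a := count.toNat
  let b := total.toNat
  if a = 0 then 0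
  else
    let r1 := pvRN a b
    let q1 := pvRat r1.1 r1.2
    let r2 := pvRN (q1.1 * 100) q1.2
    let q2 := pvRat r2.1 r2.2
    (pvHalfEven q2.1 q2.2 : Int)

def aa_percentage (sequence : String) (residues : Option (List String)) : Int :=
  let res := residues.getD pvDefaultResidues
  let total := sequence.toList.length
  if total = 0 then 0
  else
    let count : Int := (sequence.toList.map (fun aa => if String.mk [aa] ∈ res then (1 : Int) else 0)).sum
    pvRoundPct count (total : Int)

-- ===== PORT B =====
-- B-side exact model of the same float expression, written as its own decomposition
-- (arithmetic half-even formula, recursive bit length, power-of-two scaling, quotient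
-- comparisons); proved equal to the A-side model in pv_roundPct_eq below.

-- half-even as a single arithmetic correction term
def bHalfEven (n d : Nat) : Nat :=
  n / d + (if d < 2 * (n % d) ∨ (2 * (n % d) = d ∧ (n / d) % 2 = 1) then 1 else 0)

-- bit_length by recursion on halving
def bBL (n : Nat) : Nat :=
  if h : n = 0 then 0 else bBL (n / 2) + 1
decreasing_by exact Nat.div_lt_self (Nat.pos_of_ne_zero h) one_lt_two

-- (a * 2^k) / b as a pair, scaling with explicit powers of two
def bScale (a b : Nat) (k : Int) : Nat × Nat :=
  if k < 0 then (a, b * 2 ^ (-k).toNat) else (a * 2 ^ k.toNat, b)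

-- round-to-nearest double of a / b (b > 0), deciding the exponent by the integer quotient
def bRN (a b : Nat) : Nat × Int :=
  let e : Int := 52 + (bBL b : Int) - (bBL a : Int)
  let p := bScale a b e
  let k := if p.1 / p.2 < 2 ^ 52 then e + 1 else if 2 ^ 53 ≤ p.1 / p.2 then e - 1 else e
  let p2 := bScale a b k
  let s := bHalfEven p2.1 p2.2
  if s = 2 ^ 53 then (2 ^ 52, k - 1) else (s, k)

-- the double s * 2^(-k) as an exact fraction
def bRat (s : Nat) (k : Int) : Nat × Nat :=
  if k < 0 then (s * 2 ^ (-k).toNat, 1) else (s, 2 ^ k.toNat)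

-- B's model of round((count / total) * 100), chaining the two roundings
def bRoundPct (count total : Int) : Int :=
  if count ≤ 0 then 0
  else
    let f1 := bRat (bRN count.toNat total.toNat).1 (bRN count.toNat total.toNat).2
    let f2 := bRat (bRN (100 * f1.1) f1.2).1 (bRN (100 * f1.1) f1.2).2
    (bHalfEven f2.1 f2.2 : Int)

def aa_percentage_alt (sequence : String) (residues : Option (List String)) : Int :=
  let res := residues.getD pvDefaultResidues
  let total := sequence.toList.length
  if total = 0 then 0
  else
    let counts := sequence.toList.foldl
      (fun d c => d.modify (String.mk [c]) 0 (· + 1)) (PySem.Dict.empty (κ := String) (ν := Int))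
    let count : Int := ((PySem.Set.ofList res).map (fun r => counts.getD r 0)).sum
    bRoundPct count (total : Int)

-- ===== PRECONDITION & SPEC =====
def Spec_aa_percentage (sequence : String) (residues : Option (List String)) (out : Int) : Prop := out = aa_percentage_alt sequence residues
instance (sequence : String) (residues : Option (List String)) (out : Int) : Decidable (Spec_aa_percentage sequence residues out) := by unfold Spec_aa_percentage; infer_instance

-- ===== CLAIM (what is proved, stated in full; the proofs are below) =====
def Claim_equal_aa_percentage : Prop := ∀ (sequence : String) (residues : Option (List String)), Dom_aa_percentage sequence residues → Spec_aa_percentage sequence residues (aa_percentage sequence residues)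

-- ===== LEMMAS AND PROOFS =====

lemma pv_halfEven_eq (n d : Nat) : bHalfEven n d = pvHalfEven n d := by
  simp only [bHalfEven, pvHalfEven]
  split_ifs <;> omega

lemma pv_bl_eq (n : Nat) : bBL n = pvBL n := by
  induction n using Nat.strong_induction_on with
  | _ n ih =>
    rw [bBL]
    by_cases h : n = 0
    · simp [h, pvBL]
    · rw [dif_neg h, ih (n / 2) (Nat.div_lt_self (Nat.pos_of_ne_zero h) one_lt_two)]
      by_cases h1 : n = 1
      · subst h1; decide
      · have h2 : 2 ≤ n := by omega
        have hd : n / 2 ≠ 0 := by omega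
        unfold pvBL
        rw [if_neg hd, if_neg h, Nat.log2_eq_log_two, Nat.log2_eq_log_two,
            Nat.log_div_base]
        have := Nat.log_pos (b := 2) one_lt_two h2
        omega

lemma pv_scale_eq (a b : Nat) (k : Int) : bScale a b k = pvFrac a b k := by
  unfold bScale pvFrac
  rcases lt_or_ge k 0 with h | h
  · rw [if_pos h, if_neg (by omega)]
    simp [Nat.shiftLeft_eq]
  · rw [if_neg (by omega), if_pos h]
    simp [Nat.shiftLeft_eq]

lemma pv_frac_pos (a b : Nat) (k : Int) (hb : 0 < b) : 0 < (pvFrac a b k).2 := by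
  unfold pvFrac
  split_ifs
  · exact hb
  · simp only [Nat.shiftLeft_eq]
    positivity

lemma pv_rn_eq (a b : Nat) (hb : 0 < b) : bRN a b = pvRN a b := by
  unfold bRN pvRN
  simp only [pv_bl_eq, pv_scale_eq, pv_halfEven_eq]
  have hq : ∀ (k : Int),
      ((pvFrac a b k).1 / (pvFrac a b k).2 < 2 ^ 52 ↔ (pvFrac a b k).1 < 2 ^ 52 * (pvFrac a b k).2)
      ∧ (2 ^ 53 ≤ (pvFrac a b k).1 / (pvFrac a b k).2 ↔ 2 ^ 53 * (pvFrac a b k).2 ≤ (pvFrac a b k).1) := by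
    intro k
    have h2 := pv_frac_pos a b k hb
    constructor
    · exact Nat.div_lt_iff_lt_mul h2
    · exact (Nat.le_div_iff_mul_le h2).trans (by rw [Nat.mul_comm])
  have h1 := hq (52 + (pvBL b : Int) - (pvBL a : Int))
  by_cases c1 : (pvFrac a b (52 + (pvBL b : Int) - (pvBL a : Int))).1 / (pvFrac a b (52 + (pvBL b : Int) - (pvBL a : Int))).2 < 2 ^ 52
  · rw [if_pos c1, if_pos (h1.1.mp c1)]
  · rw [if_neg c1, if_neg (fun hh => c1 (h1.1.mpr hh))]
    by_cases c2 : 2 ^ 53 ≤ (pvFrac a b (52 + (pvBL b : Int) - (pvBL a : Int))).1 / (pvFrac a b (52 + (pvBL b : Int) - (pvBL a : Int))).2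
    · rw [if_pos c2, if_pos (h1.2.mp c2)]
    · rw [if_neg c2, if_neg (fun hh => c2 (h1.2.mpr hh))]

lemma pv_rat_eq (s : Nat) (k : Int) : bRat s k = pvRat s k := by
  unfold bRat pvRat
  rcases lt_or_ge k 0 with h | h
  · rw [if_pos h, if_neg (by omega)]
    simp [Nat.shiftLeft_eq]
  · rw [if_neg (by omega), if_pos h]
    simp [Nat.shiftLeft_eq]

lemma pv_rat_pos (s : Nat) (k : Int) : 0 < (pvRat s k).2 := by
  unfold pvRat
  split_ifs
  · simp only [Nat.shiftLeft_eq, Nat.one_mul]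
    positivity
  · exact Nat.one_pos

lemma pv_roundPct_eq (count total : Int) (ht : 0 < total) :
    bRoundPct count total = pvRoundPct count total := by
  unfold bRoundPct pvRoundPct
  by_cases h : count ≤ 0
  · rw [if_pos h, if_pos (by omega)]
  · rw [if_neg h, if_neg (by omega)]
    have hb : 0 < total.toNat := by omega
    simp only [pv_rat_eq, pv_rn_eq count.toNat total.toNat hb]
    have h2 : 0 < (pvRat (pvRN count.toNat total.toNat).1 (pvRN count.toNat total.toNat).2).2 :=
      pv_rat_pos _ _
    rw [Nat.mul_comm 100, pv_rn_eq _ _ h2, pv_halfEven_eq]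

-- a 0/1-indicator summed over a duplicate-free list is a membership test
lemma pv_sum_ind (y : String) (l : List String) (hnd : l.Nodup) :
    (l.map (fun r => if y = r then (1 : Int) else 0)).sum = if y ∈ l then 1 else 0 := by
  induction l with
  | nil => simp
  | cons a t ih =>
    rcases List.nodup_cons.mp hnd with ⟨ha, ht⟩
    by_cases h : y = a
    · subst h
      have : (t.map (fun r => if y = r then (1 : Int) else 0)).sum = 0 := by
        apply List.sum_eq_zero
        intro x hx
        rcases List.mem_map.mp hx with ⟨r, hr, rfl⟩
        simp only [if_neg (fun h' : y = r => ha (h' ▸ hr))]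
      simp [this]
    · simp [h, ih ht]

-- summing the sequence's per-residue counts over the distinct residues equals
-- A's one-pass membership count
lemma pv_count_sum (res l : List String) (hnd : l.Nodup)
    (hm : ∀ y, y ∈ l ↔ y ∈ res) (ys : List String) :
    (l.map (fun r => ((ys.count r : Nat) : Int))).sum
      = (ys.map (fun y => if y ∈ res then (1 : Int) else 0)).sum := by
  induction ys with
  | nil => simp
  | cons y ys ih =>
    have hc : (fun r => (((y :: ys).count r : Nat) : Int))
        = fun r => ((ys.count r : Nat) : Int) + (if r = y then (1 : Int) else 0) := by
      funext r
      by_cases h : r = y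
      · simp [h]
      · simp [h]
        rw [List.count_cons_of_ne fun a => h (id (Eq.symm a))]
    rw [hc, PySem.List.sum_map_add_int, ih]
    have he : (l.map (fun r => if r = y then (1 : Int) else 0)).sum
        = (l.map (fun r => if y = r then (1 : Int) else 0)).sum := by
      congr 1
      apply List.map_congr_left
      intro r _
      simp [eq_comm]
    rw [he, pv_sum_ind y l hnd]
    simp [hm y]
    ring

-- ===== VERDICT (by name: the statement is the Claim_ definition above) =====
theorem aa_percentage_spec : Claim_equal_aa_percentage := by
  intro sequence residues _
  unfold Spec_aa_percentage aa_percentage aa_percentage_alt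
  by_cases h : sequence.toList.length = 0
  · simp [h]
  · simp only [h]
    rw [pv_roundPct_eq _ _ (by exact_mod_cast Nat.pos_of_ne_zero h)]
    congr 1
    have hcounts : ∀ r : String,
        ((sequence.toList.foldl
          (fun d c => d.modify (String.mk [c]) 0 (· + 1)) (PySem.Dict.empty (κ := String) (ν := Int))).getD r 0)
        = (((sequence.toList.map (fun c => String.mk [c])).count r : Nat) : Int) := by
      intro r
      rw [show (fun (d : PySem.Dict String Int) (c : Char) => d.modify (String.mk [c]) 0 (· + 1))
            = (fun d c => d.modify (String.mk [c]) 0 (· + 1)) from rfl]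
      rw [← List.foldl_map (f := fun c => String.mk [c])
            (g := fun (d : PySem.Dict String Int) aa => d.modify aa 0 (· + 1))]
      rw [PySem.Dict.getD_foldl_modify_add_one]
      simp [PySem.Dict.empty, PySem.Dict.getD, PySem.Dict.get?]
    have hmap : ((PySem.Set.ofList (residues.getD pvDefaultResidues)).map
          (fun r => ((sequence.toList.foldl
            (fun d c => d.modify (String.mk [c]) 0 (· + 1)) (PySem.Dict.empty (κ := String) (ν := Int))).getD r 0))).sum
        = ((PySem.Set.ofList (residues.getD pvDefaultResidues)).map
            (fun r => (((sequence.toList.map (fun c => String.mk [c])).count r : Nat) : Int))).sum := by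
      congr 1
      exact List.map_congr_left (fun r _ => hcounts r)
    rw [hmap, pv_count_sum (residues.getD pvDefaultResidues) _
          (PySem.Set.nodup_ofList _) (fun y => PySem.Set.mem_ofList _ y)]
    rw [List.map_map]
    rfl
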